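-- pv_equiv track=rewrite | github.com/chenxingyuu/fastapi_template | cores/scope.py | filter_scopes
-- ===== SOURCE A (Python) =====
-- def filter_scopes(scope_list: list[str]) -> list[str]:
--     """
--     过滤范围
--     >>> filter_scopes(["a:b:c", "a:b:d", "a:b", "d", "e:f"])
--     ['d', 'a:b', 'e:f']
--     """
--     # 按层级排序
--     sorted_scopes = sorted(scope_list, key=lambda x: x.count(":"))
--
--     result = []
--     # 使用一个集合来跟踪已处理的权限
--     covered_scopes = set()
--
--     for scope in sorted_scopes:
--         # 检查当前权限是否被其他权限覆盖
--         if not any(scope.startswith(covered_scope + ":") for covered_scope in covered_scopes):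
--             result.append(scope)
--             covered_scopes.add(scope)
--
--     return result
-- ===== SOURCE B (Python) =====
-- def filter_scopes(scope_list: list[str]) -> list[str]:
--     # For each scope, test its colon-boundary ancestor prefixes against the
--     # covered set directly, instead of scanning every covered scope.
--     result = []
--     covered = set()
--     for scope in sorted(scope_list, key=lambda x: x.count(":")):
--         prefixes = [scope[:i] for i, ch in enumerate(scope) if ch == ":"]
--         if not any(p in covered for p in prefixes):
--             result.append(scope)
--             covered.add(scope)
--     return result
-- ===== Notes on version B (the rewrite author's own statement) =====
-- stated objective: faster
-- what changed: Instead of scanning the whole covered set with startswith for every scope, B enumerates each scope's colon-boundary ancestor prefixes once and tests them by hash-set membership, removing the inner scan over covered scopes.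
import Mathlib
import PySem

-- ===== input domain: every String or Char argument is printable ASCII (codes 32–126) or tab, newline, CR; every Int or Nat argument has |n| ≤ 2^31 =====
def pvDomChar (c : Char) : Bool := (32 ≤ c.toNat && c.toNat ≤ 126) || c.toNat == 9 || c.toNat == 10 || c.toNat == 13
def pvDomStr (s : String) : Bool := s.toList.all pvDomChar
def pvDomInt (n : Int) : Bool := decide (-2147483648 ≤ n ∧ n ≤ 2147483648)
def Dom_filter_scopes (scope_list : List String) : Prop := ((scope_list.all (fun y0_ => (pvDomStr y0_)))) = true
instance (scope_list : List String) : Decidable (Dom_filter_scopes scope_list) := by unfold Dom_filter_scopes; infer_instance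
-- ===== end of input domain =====

-- B replaces A's inner scan of the covered set (startswith against every covered scope)
-- by enumerating each scope's colon-boundary prefixes and testing set membership; faster.

-- ===== PORT A =====
def filter_scopes (scope_list : List String) : List String :=
  let sorted_scopes := PySem.List.sorted scope_list (fun x => PySem.Str.count x ":") false
  (sorted_scopes.foldl
    (fun (st : List String × PySem.Set String) scope =>
      if st.2.any (fun covered_scope => PySem.Str.startswith scope (covered_scope ++ ":")) then st
      else (st.1 ++ [scope], PySem.Set.add st.2 scope))
    ([], PySem.Set.empty)).1

-- ===== PORT B =====
-- the list comprehension [scope[:i] for i, ch in enumerate(scope) if ch == ":"]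
def altPrefixes (scope : String) : List String :=
  (PySem.List.enumerate scope.toList 0).filterMap
    (fun p => if p.2 = ':' then some (PySem.Str.slice scope none (some p.1)) else none)

def filter_scopes_alt (scope_list : List String) : List String :=
  ((PySem.List.sorted scope_list (fun x => PySem.Str.count x ":") false).foldl
    (fun (st : List String × PySem.Set String) scope =>
      if (altPrefixes scope).any (fun p => PySem.Set.contains st.2 p) then st
      else (st.1 ++ [scope], PySem.Set.add st.2 scope))
    ([], PySem.Set.empty)).1

-- ===== PRECONDITION & SPEC =====
def Spec_filter_scopes (scope_list : List String) (out : List String) : Prop := out = filter_scopes_alt scope_list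
instance (scope_list : List String) (out : List String) : Decidable (Spec_filter_scopes scope_list out) := by unfold Spec_filter_scopes; infer_instance

-- ===== CLAIM (what is proved, stated in full; the proofs are below) =====
def Claim_equal_filter_scopes : Prop := ∀ (scope_list : List String), Dom_filter_scopes scope_list → Spec_filter_scopes scope_list (filter_scopes scope_list)

-- ===== LEMMAS AND PROOFS =====

-- l ++ [':'] is a prefix of cs iff l is cs cut at some colon position
theorem prefix_colon_iff (cs l : List Char) :
    (l ++ [':']) <+: cs ↔ ∃ k : Nat, k < cs.length ∧ cs[k]? = some ':' ∧ l = cs.take k := by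
  constructor
  · rintro ⟨t, ht⟩
    refine ⟨l.length, ?_, ?_, ?_⟩
    · subst ht; simp
    · subst ht; simp
    · subst ht; simp
  · rintro ⟨k, hk, hc, hl⟩
    refine ⟨cs.drop (k + 1), ?_⟩
    have : cs = cs.take k ++ cs[k] :: cs.drop (k + 1) := by
      conv_lhs => rw [← List.take_append_drop k cs]
      rw [List.drop_eq_getElem_cons hk]
    rw [List.getElem?_eq_getElem hk] at hc
    simp at hc
    rw [hl, List.append_assoc, List.singleton_append, ← hc, ← this]

theorem mem_altPrefixes_iff (s c : String) :
    c ∈ altPrefixes s ↔ PySem.Str.startswith s (c ++ ":") = true := by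
  simp only [altPrefixes, List.mem_filterMap, PySem.List.mem_enumerate_iff]
  rw [PySem.Str.startswith_eq, PySem.Chars.startswith_iff]
  have : (c ++ ":").toList = c.toList ++ [':'] := by simp
  rw [this, prefix_colon_iff]
  constructor
  · rintro ⟨p, ⟨k, hk, hp⟩, h⟩
    subst hp
    simp only [] at h
    split_ifs at h with hcol
    · simp only [Option.some_inj] at h
      refine ⟨k, hk, ?_, ?_⟩
      · simp [List.getElem?_eq_getElem hk, hcol]
      · have h2 := congrArg String.toList h
        rw [PySem.Str.toList_slice, PySem.Chars.slice_eq_listSlice, zero_add,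
            PySem.List.slice_to_natCast] at h2
        exact h2.symm
  · rintro ⟨k, hk, hc, hl⟩
    rw [List.getElem?_eq_getElem hk, Option.some_inj] at hc
    refine ⟨(k, s.toList[k]), ⟨k, hk, by simp⟩, ?_⟩
    simp only [hc, if_true, Option.some_inj]
    apply String.toList_injective
    rw [PySem.Str.toList_slice, PySem.Chars.slice_eq_listSlice, PySem.List.slice_to_natCast]
    exact hl.symm

theorem guard_eq (cov : PySem.Set String) (s : String) :
    cov.any (fun c => PySem.Str.startswith s (c ++ ":"))
      = (altPrefixes s).any (fun p => PySem.Set.contains cov p) := by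
  rw [Bool.eq_iff_iff]
  simp only [List.any_eq_true, PySem.Set.contains]
  constructor
  · rintro ⟨c, hc, hs⟩
    exact ⟨c, (mem_altPrefixes_iff s c).mpr hs, by simpa using hc⟩
  · rintro ⟨p, hp, hmem⟩
    exact ⟨p, by simpa using hmem, (mem_altPrefixes_iff s p).mp hp⟩

-- ===== VERDICT (by name: the statement is the Claim_ definition above) =====
theorem step_fun_eq :
    (fun (st : List String × PySem.Set String) scope =>
      if st.2.any (fun covered_scope => PySem.Str.startswith scope (covered_scope ++ ":")) then st
      else (st.1 ++ [scope], PySem.Set.add st.2 scope))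
      = (fun (st : List String × PySem.Set String) scope =>
      if (altPrefixes scope).any (fun p => PySem.Set.contains st.2 p) then st
      else (st.1 ++ [scope], PySem.Set.add st.2 scope)) := by
  funext st scope
  rw [guard_eq st.2 scope]

theorem filter_scopes_spec : Claim_equal_filter_scopes := by
  intro scope_list _
  show filter_scopes scope_list = filter_scopes_alt scope_list
  unfold filter_scopes filter_scopes_alt
  rw [step_fun_eq]
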